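-- pv_equiv track=rewrite | github.com/bsoist/codesignal-arcade-solutions | 1_the_core/008_phone_call.py | solution
-- ===== SOURCE A (Python) =====
-- def solution(min1, min2_10, min11, s):
--     if min1 > s: return 0
--     if min1 == s: return 1
--     minutes, s = 1, s - min1
--     while minutes < 10:
--         if s >= min2_10:
--             s -= min2_10
--             minutes += 1
--         else:
--             return minutes
--     while s >= min11:
--         s -= min11
--         minutes += 1
--     return minutes
-- ===== SOURCE B (Python) =====
-- def solution(min1, min2_10, min11, s):
--     if s < min1:
--         return 0
--     if s == min1:
--         return 1
--     s -= min1
--     mid = 9 if min2_10 <= 0 else min(9, s // min2_10)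
--     if mid < 9:
--         return 1 + mid
--     s -= 9 * min2_10
--     return 10 + (s // min11 if min11 > 0 else 0)
-- ===== Notes on version B (the rewrite author's own statement) =====
-- stated objective: faster
-- what changed: Replaces A's two subtraction while-loops (minute-by-minute budget decrement) by a closed-form computation: an early-out comparison for the first minute, min(9, s//min2_10) for the 2-10 tier, and s//min11 for the 11+ tier.
import Mathlib
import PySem

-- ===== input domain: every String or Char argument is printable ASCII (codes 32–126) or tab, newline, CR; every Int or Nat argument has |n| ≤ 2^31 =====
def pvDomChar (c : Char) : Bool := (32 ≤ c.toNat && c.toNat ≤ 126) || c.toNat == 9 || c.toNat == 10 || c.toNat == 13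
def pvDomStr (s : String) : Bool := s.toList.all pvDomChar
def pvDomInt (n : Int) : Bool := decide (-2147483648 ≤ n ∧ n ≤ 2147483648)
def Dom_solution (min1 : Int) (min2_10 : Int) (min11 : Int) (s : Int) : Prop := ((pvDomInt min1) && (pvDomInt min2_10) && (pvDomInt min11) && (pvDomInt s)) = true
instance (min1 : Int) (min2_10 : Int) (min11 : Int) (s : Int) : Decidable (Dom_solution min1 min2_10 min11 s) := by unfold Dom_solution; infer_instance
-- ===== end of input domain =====

-- B replaces A's two subtraction loops by closed-form floor divisions; objective: faster (O(1) arithmetic vs A's O(s/min11) loop).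

-- ===== PORT A =====
-- first while loop `while minutes < 10: …`; Sum.inl m = the `return minutes` inside the loop,
-- Sum.inr (s, minutes) = falling through to the second loop
def solLoop1 (min2_10 : Int) (s : Int) (minutes : Int) : Int ⊕ (Int × Int) :=
  if _h : minutes < 10 then
    if s ≥ min2_10 then solLoop1 min2_10 (s - min2_10) (minutes + 1)
    else Sum.inl minutes
  else Sum.inr (s, minutes)
termination_by (10 - minutes).toNat
decreasing_by omega

-- second while loop `while s >= min11: …`, made total with fuel; fuel runs out only
-- on inputs excluded by Pre_solution (where the Python loop never terminates)
def solLoop2 (min11 : Int) (fuel : Nat) (s : Int) (minutes : Int) : Int :=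
  match fuel with
  | 0 => minutes
  | f + 1 => if s ≥ min11 then solLoop2 min11 f (s - min11) (minutes + 1) else minutes

def solution (min1 : Int) (min2_10 : Int) (min11 : Int) (s : Int) : Int :=
  if min1 > s then 0
  else if min1 = s then 1
  else
    match solLoop1 min2_10 (s - min1) 1 with
    | Sum.inl m => m
    | Sum.inr (s2, m) => solLoop2 min11 (s2.toNat + 1) s2 m

-- ===== PORT B =====
-- Source B's local `mid = 9 if min2_10 <= 0 else min(9, s // min2_10)`
def altMid (min2_10 : Int) (s1 : Int) : Int :=
  if min2_10 ≤ 0 then 9 else min 9 (PySem.Int.floordiv s1 min2_10)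

def solution_alt (min1 : Int) (min2_10 : Int) (min11 : Int) (s : Int) : Int :=
  if s < min1 then 0
  else if s = min1 then 1
  else if altMid min2_10 (s - min1) < 9 then 1 + altMid min2_10 (s - min1)
  else 10 + (if min11 > 0 then PySem.Int.floordiv (s - min1 - 9 * min2_10) min11 else 0)

-- ===== PRECONDITION & SPEC =====
-- Pre_ excludes exactly the inputs on which A's Python never terminates: the second while
-- loop is reached (s > min1 and all nine middle minutes affordable) with min11 ≤ 0, so
-- `s -= min11` never brings s below min11.
def Pre_solution (min1 : Int) (min2_10 : Int) (min11 : Int) (s : Int) : Prop :=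
  ¬ (min1 < s ∧ min11 ≤ 0 ∧ (min2_10 ≤ 0 ∨ s - min1 ≥ 9 * min2_10))
instance (min1 : Int) (min2_10 : Int) (min11 : Int) (s : Int) : Decidable (Pre_solution min1 min2_10 min11 s) := by unfold Pre_solution; infer_instance

def pvWitness_solution : Int × Int × Int × Int := (3, 2, 4, 30)

def Spec_solution (min1 : Int) (min2_10 : Int) (min11 : Int) (s : Int) (out : Int) : Prop := out = solution_alt min1 min2_10 min11 s
instance (min1 : Int) (min2_10 : Int) (min11 : Int) (s : Int) (out : Int) : Decidable (Spec_solution min1 min2_10 min11 s out) := by unfold Spec_solution; infer_instance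

-- ===== CLAIM (what is proved, stated in full; the proofs are below) =====
def Claim_equal_solution : Prop := ∀ (min1 : Int) (min2_10 : Int) (min11 : Int) (s : Int), Dom_solution min1 min2_10 min11 s → Pre_solution min1 min2_10 min11 s → Spec_solution min1 min2_10 min11 s (solution min1 min2_10 min11 s)

-- ===== LEMMAS AND PROOFS =====

-- first loop, positive price: returns early with minutes + s/min2_10 iff fewer than
-- (10 - minutes) further minutes are affordable, else exits with all middle minutes bought
theorem solLoop1_pos (min2_10 : Int) (hpos : 0 < min2_10) :
    ∀ (s minutes : Int), 0 ≤ s → minutes ≤ 10 →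
      solLoop1 min2_10 s minutes =
        if s < (10 - minutes) * min2_10 then Sum.inl (minutes + s / min2_10)
        else Sum.inr (s - (10 - minutes) * min2_10, 10) := by
  intro s minutes
  induction s, minutes using solLoop1.induct min2_10 with
  | case1 s minutes h hge ih =>
    intro hs hm
    rw [solLoop1]
    simp only [h, hge, if_true, dif_pos]
    rw [ih (by omega) (by omega)]
    have hdiv : (s - min2_10) / min2_10 = s / min2_10 - 1 := by
      have := Int.add_mul_ediv_right s (-1) (show min2_10 ≠ 0 by omega)
      simpa [sub_eq_add_neg, neg_mul] using this
    have harith : (10 - (minutes + 1)) * min2_10 = (10 - minutes) * min2_10 - min2_10 := by ring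
    by_cases hc : s - min2_10 < (10 - (minutes + 1)) * min2_10
    · rw [if_pos hc, if_pos (by omega), hdiv]
      congr 1; omega
    · rw [if_neg hc, if_neg (by omega)]
      congr 2; omega
  | case2 s minutes h hlt =>
    intro hs hm
    rw [solLoop1]
    simp only [h, dif_pos, if_neg (by omega : ¬ s ≥ min2_10)]
    have h1 : min2_10 ≤ (10 - minutes) * min2_10 := by
      have : 1 * min2_10 ≤ (10 - minutes) * min2_10 :=
        mul_le_mul_of_nonneg_right (by omega) (by omega)
      simpa using this
    rw [if_pos (by omega)]
    have hdiv0 : s / min2_10 = 0 := Int.ediv_eq_zero_of_lt hs (by omega)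
    simp [hdiv0]
  | case3 s minutes h =>
    intro hs hm
    have hm10 : minutes = 10 := by omega
    subst hm10
    rw [solLoop1, dif_neg (by omega : ¬ (10:Int) < 10)]
    have hz : (10 - (10:Int)) * min2_10 = 0 := by ring
    rw [hz, if_neg (by omega)]
    norm_num

-- first loop, non-positive price with non-negative budget: all nine minutes are bought
theorem solLoop1_nonpos (min2_10 : Int) (hnp : min2_10 ≤ 0) :
    ∀ (s minutes : Int), 0 ≤ s → minutes ≤ 10 →
      solLoop1 min2_10 s minutes = Sum.inr (s - (10 - minutes) * min2_10, 10) := by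
  intro s minutes
  induction s, minutes using solLoop1.induct min2_10 with
  | case1 s minutes h hge ih =>
    intro hs hm
    rw [solLoop1]
    simp only [h, hge, if_true, dif_pos]
    rw [ih (by omega) (by omega)]
    congr 2; ring
  | case2 s minutes h hlt =>
    intro hs hm; omega
  | case3 s minutes h =>
    intro hs hm
    have hm10 : minutes = 10 := by omega
    subst hm10
    rw [solLoop1, dif_neg (by omega : ¬ (10:Int) < 10)]
    have hz : (10 - (10:Int)) * min2_10 = 0 := by ring
    rw [hz]
    norm_num

-- second loop with a positive price and non-negative budget computes minutes + s / min11
theorem solLoop2_pos (min11 : Int) (hpos : 0 < min11) :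
    ∀ (fuel : Nat) (s minutes : Int), 0 ≤ s → s.toNat < fuel →
      solLoop2 min11 fuel s minutes = minutes + s / min11 := by
  intro fuel
  induction fuel with
  | zero => intro s minutes hs hf; omega
  | succ f ih =>
    intro s minutes hs hf
    rw [solLoop2]
    by_cases hge : s ≥ min11
    · rw [if_pos hge, ih (s - min11) (minutes + 1) (by omega) (by omega)]
      have hdiv : (s - min11) / min11 = s / min11 - 1 := by
        have := Int.add_mul_ediv_right s (-1) (show min11 ≠ 0 by omega)
        simpa [sub_eq_add_neg, neg_mul] using this
      rw [hdiv]; ring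
    · rw [if_neg hge]
      have hdiv0 : s / min11 = 0 := Int.ediv_eq_zero_of_lt hs (by omega)
      simp [hdiv0]

-- ===== VERDICT (by name: the statement is the Claim_ definition above) =====
theorem solution_spec : Claim_equal_solution := by
  intro min1 min2_10 min11 s _hdom hpre
  unfold Pre_solution at hpre
  unfold Spec_solution
  by_cases h0 : min1 > s
  · unfold solution solution_alt
    rw [if_pos h0, if_pos (by omega)]
  · by_cases h1 : min1 = s
    · unfold solution solution_alt
      rw [if_neg h0, if_pos h1, if_neg (by omega), if_pos h1.symm]
    · have hs1 : (0:Int) < s - min1 := by omega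
      have h9 : (10 - (1:Int)) * min2_10 = 9 * min2_10 := by ring
      by_cases h2 : min2_10 ≤ 0
      · -- all nine middle minutes afforded; Pre_ forces 0 < min11
        have h11 : 0 < min11 := by
          by_contra hcc; exact hpre ⟨by omega, by omega, Or.inl h2⟩
        have hs2 : (0:Int) ≤ s - min1 - 9 * min2_10 := by nlinarith
        have hA : solution min1 min2_10 min11 s =
            solLoop2 min11 ((s - min1 - 9 * min2_10).toNat + 1) (s - min1 - 9 * min2_10) 10 := by
          unfold solution
          rw [if_neg h0, if_neg h1,
            solLoop1_nonpos min2_10 h2 (s - min1) 1 (by omega) (by omega), h9]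
        rw [hA, solLoop2_pos min11 h11 _ _ 10 hs2 (by omega)]
        unfold solution_alt altMid
        rw [if_neg (by omega), if_neg (by omega), if_pos h2,
          if_neg (by omega : ¬ (9:Int) < 9), if_pos h11,
          PySem.Int.floordiv_eq_ediv_of_pos h11]
      · have h2' : 0 < min2_10 := by omega
        by_cases hc : s - min1 < 9 * min2_10
        · -- A returns inside the first loop
          have hq : (s - min1) / min2_10 < 9 := by
            by_contra hcon
            have := (Int.le_ediv_iff_mul_le h2').mp (not_lt.mp hcon)
            omega
          have hA : solution min1 min2_10 min11 s = 1 + (s - min1) / min2_10 := by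
            unfold solution
            rw [if_neg h0, if_neg h1,
              solLoop1_pos min2_10 h2' (s - min1) 1 (by omega) (by omega), h9,
              if_pos (by omega)]
          rw [hA]
          unfold solution_alt altMid
          rw [if_neg (by omega), if_neg (by omega), if_neg h2,
            PySem.Int.floordiv_eq_ediv_of_pos h2']
          rw [if_pos (by omega : min 9 ((s - min1) / min2_10) < 9)]
          omega
        · -- first loop completes; Pre_ forces 0 < min11
          have h11 : 0 < min11 := by
            by_contra hcc; exact hpre ⟨by omega, by omega, Or.inr (by omega)⟩
          have hq : (9:Int) ≤ (s - min1) / min2_10 :=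
            (Int.le_ediv_iff_mul_le h2').mpr (by omega)
          have hs2 : (0:Int) ≤ s - min1 - 9 * min2_10 := by omega
          have hA : solution min1 min2_10 min11 s =
              solLoop2 min11 ((s - min1 - 9 * min2_10).toNat + 1) (s - min1 - 9 * min2_10) 10 := by
            unfold solution
            rw [if_neg h0, if_neg h1,
              solLoop1_pos min2_10 h2' (s - min1) 1 (by omega) (by omega), h9,
              if_neg (by omega)]
          rw [hA, solLoop2_pos min11 h11 _ _ 10 hs2 (by omega)]
          unfold solution_alt altMid
          rw [if_neg (by omega), if_neg (by omega), if_neg h2,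
            PySem.Int.floordiv_eq_ediv_of_pos h2']
          rw [if_neg (by omega : ¬ min 9 ((s - min1) / min2_10) < 9), if_pos h11,
            PySem.Int.floordiv_eq_ediv_of_pos h11]
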